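-- pv_equiv track=rewrite | github.com/siriusnen-commits/archmind-mvp | src/archmind/project_query.py | _canonicalize_plan_command
-- ===== SOURCE A (Python) =====
-- from typing import Any
--
-- def _normalize_plan_page(value: Any) -> str:
--     return str(value or "").strip().replace("\\", "/").strip("/").lower()
--
-- def _normalize_plan_api_endpoint(method: Any, path: Any) -> str:
--     method_text = str(method or "").strip().upper()
--     path_text = str(path or "").strip()
--     if not method_text or not path_text:
--         return ""
--     if not path_text.startswith("/"):
--         path_text = f"/{path_text}"
--     return f"{method_text} {path_text}"
--
-- def _canonicalize_plan_command(command: Any) -> str: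
--     text = str(command or "").strip()
--     if not text.startswith("/"):
--         return ""
--     parts = [part for part in text.split() if part]
--     if not parts:
--         return ""
--     cmd = parts[0].strip().lower()
--     if cmd in {"/fix", "/inspect", "/next", "/auto"} and len(parts) == 1:
--         return cmd
--     if cmd == "/add_entity" and len(parts) >= 2:
--         entity = str(parts[1] or "").strip()
--         return f"/add_entity {entity}" if entity else ""
--     if cmd == "/add_field" and len(parts) >= 3:
--         entity = str(parts[1] or "").strip()
--         expr = str(parts[2] or "").strip()
--         if ":" in expr:
--             field_name, field_type = expr.split(":", 1)
--         else:
--             field_name, field_type = expr, "string"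
--         field_name = str(field_name or "").strip().lower()
--         field_type = str(field_type or "").strip().lower() or "string"
--         if not entity or not field_name:
--             return ""
--         return f"/add_field {entity} {field_name}:{field_type}"
--     if cmd == "/add_api" and len(parts) >= 3:
--         endpoint = _normalize_plan_api_endpoint(parts[1], parts[2])
--         return f"/add_api {endpoint}" if endpoint else ""
--     if cmd in {"/add_page", "/implement_page"} and len(parts) >= 2:
--         page = _normalize_plan_page(parts[1])
--         return f"{cmd} {page}" if page else ""
--     return ""
-- ===== SOURCE B (Python) =====
-- from typing import Any
--
--
-- def _normalize_plan_page(value: Any) -> str: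
--     return str(value or "").strip().replace("\\", "/").strip("/").lower()
--
--
-- def _normalize_plan_api_endpoint(method: Any, path: Any) -> str:
--     method_text = str(method or "").strip().upper()
--     path_text = str(path or "").strip()
--     if not method_text or not path_text:
--         return ""
--     if not path_text.startswith("/"):
--         path_text = f"/{path_text}"
--     return f"{method_text} {path_text}"
--
--
-- def _slot_ident(args):
--     return args[0]
--
--
-- def _slot_field(args):
--     name, _, typ = args[0].partition(":")
--     name = name.lower()
--     typ = typ.lower() or "string"
--     return f"{name}:{typ}" if name else ""
--
--
-- def _slot_api(args):
--     return _normalize_plan_api_endpoint(args[0], args[1])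
--
--
-- def _slot_page(args):
--     return _normalize_plan_page(args[0])
--
--
-- # declarative grammar: command -> list of slots, each slot = (tokens consumed, normalizer)
-- _GRAMMAR = {
--     "/fix": [],
--     "/inspect": [],
--     "/next": [],
--     "/auto": [],
--     "/add_entity": [(1, _slot_ident)],
--     "/add_field": [(1, _slot_ident), (1, _slot_field)],
--     "/add_api": [(2, _slot_api)],
--     "/add_page": [(1, _slot_page)],
--     "/implement_page": [(1, _slot_page)],
-- }
--
--
-- def _dispatch(cmd, parts):
--     slots = _GRAMMAR.get(cmd)
--     if slots is None:
--         return ""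
--     need = sum(k for k, _ in slots)
--     if need == 0:
--         return cmd if len(parts) == 1 else ""
--     if len(parts) < 1 + need:
--         return ""
--     out = [cmd]
--     i = 1
--     for k, f in slots:
--         tok = f(parts[i:i + k])
--         i += k
--         if not tok:
--             return ""
--         out.append(tok)
--     return " ".join(out)
--
--
-- def _canonicalize_plan_command(command: Any) -> str:
--     text = str(command or "").strip()
--     if not text.startswith("/"):
--         return ""
--     parts = text.split()
--     if not parts:
--         return ""
--     return _dispatch(parts[0].lower(), parts)
-- ===== Notes on version B (the rewrite author's own statement) =====
-- stated objective: alternative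
-- what changed: A's if-elif chain with per-command inline logic is replaced by a declarative grammar table (command -> list of (tokens-consumed, normalizer) slots) executed by ONE generic interpreter loop that slices tokens, normalizes each slot, aborts on an empty slot and joins the accumulated token list; field parsing uses str.partition instead of a bounded split, and the per-command arity guards collapse into one generic length check derived from the grammar.
import Mathlib
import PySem

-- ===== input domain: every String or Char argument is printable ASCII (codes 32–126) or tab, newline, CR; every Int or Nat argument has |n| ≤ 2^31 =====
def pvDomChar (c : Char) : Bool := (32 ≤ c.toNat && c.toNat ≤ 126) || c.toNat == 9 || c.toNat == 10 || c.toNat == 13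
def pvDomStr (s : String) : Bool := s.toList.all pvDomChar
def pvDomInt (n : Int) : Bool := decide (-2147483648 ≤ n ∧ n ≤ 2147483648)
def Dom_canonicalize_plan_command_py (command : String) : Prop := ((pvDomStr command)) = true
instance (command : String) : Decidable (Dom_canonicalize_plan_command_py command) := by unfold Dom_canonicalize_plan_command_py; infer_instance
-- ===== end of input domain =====

-- B replaces A's if-elif chain by a declarative grammar table of (tokens-consumed, normalizer) slots run by one generic interpreter loop (objective: alternative; same cost).

-- str(x or "") for a string x: "" is falsy and maps to "", any other string is itself
def pv_or_empty (s : String) : String := if s == "" then "" else s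

-- _normalize_plan_page (helper identical in Source A and Source B)
def pv_norm_page (value : String) : String :=
  PySem.Str.lower (PySem.Str.stripChars (PySem.Str.replace (PySem.Str.strip (pv_or_empty value)) "\\" "/") "/")

-- _normalize_plan_api_endpoint (helper identical in Source A and Source B)
def pv_norm_api (method path : String) : String :=
  let method_text := PySem.Str.upper (PySem.Str.strip (pv_or_empty method))
  let path_text := PySem.Str.strip (pv_or_empty path)
  if method_text == "" || path_text == "" then ""
  else
    let path_text := if !(PySem.Str.startswith path_text "/") then "/" ++ path_text else path_text
    method_text ++ " " ++ path_text

-- ===== PORT A =====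
-- parts[i] is in range under the surrounding length guard, so pyGet? … |>.getD "" is exact; the Python
-- tuple unpack of expr.split(":", 1) (exactly 2 pieces when ":" in expr) is ported as the two indexings.
def canonicalize_plan_command_py (command : String) : String :=
  let text := PySem.Str.strip (pv_or_empty command)
  if !(PySem.Str.startswith text "/") then ""
  else
    let parts := (PySem.Str.split₀ text).filter (fun part => !(part == ""))
    if parts == [] then ""
    else
      let cmd := PySem.Str.lower (PySem.Str.strip ((PySem.List.pyGet? parts 0).getD ""))
      if (cmd == "/fix" || cmd == "/inspect" || cmd == "/next" || cmd == "/auto") && parts.length == 1 then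
        cmd
      else if cmd == "/add_entity" && decide (2 ≤ parts.length) then
        let entity := PySem.Str.strip (pv_or_empty ((PySem.List.pyGet? parts 1).getD ""))
        if !(entity == "") then "/add_entity " ++ entity else ""
      else if cmd == "/add_field" && decide (3 ≤ parts.length) then
        let entity := PySem.Str.strip (pv_or_empty ((PySem.List.pyGet? parts 1).getD ""))
        let expr := PySem.Str.strip (pv_or_empty ((PySem.List.pyGet? parts 2).getD ""))
        let pieces := (PySem.Str.splitMax? expr ":" 1).getD []
        let fn0 := if PySem.Str.isIn ":" expr then (PySem.List.pyGet? pieces 0).getD "" else expr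
        let ft0 := if PySem.Str.isIn ":" expr then (PySem.List.pyGet? pieces 1).getD "" else "string"
        let field_name := PySem.Str.lower (PySem.Str.strip (pv_or_empty fn0))
        let ft1 := PySem.Str.lower (PySem.Str.strip (pv_or_empty ft0))
        let field_type := if ft1 == "" then "string" else ft1
        if entity == "" || field_name == "" then ""
        else "/add_field " ++ entity ++ " " ++ field_name ++ ":" ++ field_type
      else if cmd == "/add_api" && decide (3 ≤ parts.length) then
        let endpoint := pv_norm_api ((PySem.List.pyGet? parts 1).getD "") ((PySem.List.pyGet? parts 2).getD "")
        if !(endpoint == "") then "/add_api " ++ endpoint else ""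
      else if (cmd == "/add_page" || cmd == "/implement_page") && decide (2 ≤ parts.length) then
        let page := pv_norm_page ((PySem.List.pyGet? parts 1).getD "")
        if !(page == "") then cmd ++ " " ++ page else ""
      else ""

-- ===== PORT B =====
-- args[j] inside a slot normalizer is in range because the engine always hands a slot exactly k tokens,
-- so pyGet? … |>.getD "" is exact under that guard.
def pv_slot_ident (args : List String) : String := (PySem.List.pyGet? args 0).getD ""

-- Python s.partition(":") for the single-character separator; only the (before, after) pieces are used
-- by _slot_field's unpack 'name, _, typ', so the pair is returned; exact
def pv_partition_colon (s : String) : String × String :=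
  let l := s.toList
  if ':' ∈ l then
    (String.ofList (l.takeWhile (fun c => !(c == ':'))),
     String.ofList ((l.dropWhile (fun c => !(c == ':'))).tail))
  else (s, "")

def pv_slot_field (args : List String) : String :=
  let p := pv_partition_colon ((PySem.List.pyGet? args 0).getD "")
  let name := PySem.Str.lower p.1
  let typ0 := PySem.Str.lower p.2
  let typ := if typ0 == "" then "string" else typ0
  if !(name == "") then name ++ ":" ++ typ else ""

def pv_slot_api (args : List String) : String :=
  pv_norm_api ((PySem.List.pyGet? args 0).getD "") ((PySem.List.pyGet? args 1).getD "")

def pv_slot_page (args : List String) : String :=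
  pv_norm_page ((PySem.List.pyGet? args 0).getD "")

-- the declarative grammar _GRAMMAR: command -> slots, each slot = (tokens consumed, normalizer)
def pv_grammar : PySem.Dict String (List (Int × (List String → String))) :=
  PySem.Dict.mk
    [("/fix", []), ("/inspect", []), ("/next", []), ("/auto", []),
     ("/add_entity", [(1, pv_slot_ident)]),
     ("/add_field", [(1, pv_slot_ident), (1, pv_slot_field)]),
     ("/add_api", [(2, pv_slot_api)]),
     ("/add_page", [(1, pv_slot_page)]),
     ("/implement_page", [(1, pv_slot_page)])]

-- the generic interpreter loop 'for k, f in slots: …' with accumulator (i, out)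
def pv_run_slots (parts : List String) : List (Int × (List String → String)) → Int → List String → String
  | [], _, out => PySem.Str.join " " out
  | (k, f) :: rest, i, out =>
      let tok := f (PySem.List.slice parts (some i) (some (i + k)))
      if tok == "" then "" else pv_run_slots parts rest (i + k) (out ++ [tok])

-- _dispatch(cmd, parts): grammar lookup + the generic slot interpreter
def pv_dispatch (cmd : String) (parts : List String) : String :=
  match pv_grammar.get? cmd with
  | none => ""
  | some slots =>
    let need := (slots.map (fun s => s.1)).sum
    if need == 0 then (if parts.length == 1 then cmd else "")
    else if (parts.length : Int) < 1 + need then ""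
    else pv_run_slots parts slots 1 [cmd]

def canonicalize_plan_command_py_alt (command : String) : String :=
  let text := PySem.Str.strip (pv_or_empty command)
  if !(PySem.Str.startswith text "/") then ""
  else
    let parts := PySem.Str.split₀ text
    if parts == [] then ""
    else pv_dispatch (PySem.Str.lower ((PySem.List.pyGet? parts 0).getD "")) parts

-- ===== PRECONDITION & SPEC =====
def Spec_canonicalize_plan_command_py (command : String) (out : String) : Prop := out = canonicalize_plan_command_py_alt command
instance (command : String) (out : String) : Decidable (Spec_canonicalize_plan_command_py command out) := by unfold Spec_canonicalize_plan_command_py; infer_instance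

-- ===== CLAIM (what is proved, stated in full; the proofs are below) =====
def Claim_equal_canonicalize_plan_command_py : Prop := ∀ (command : String), Dom_canonicalize_plan_command_py command → Spec_canonicalize_plan_command_py command (canonicalize_plan_command_py command)

-- ===== LEMMAS AND PROOFS =====

theorem pv_split0_go_spec (s cur : List Char) (acc : List (List Char))
    (hacc : ∀ t ∈ acc, t ≠ [] ∧ ∀ c ∈ t, PySem.Chars.isspace c = false)
    (hcur : ∀ c ∈ cur, PySem.Chars.isspace c = false) :
    ∀ t ∈ PySem.Chars.split₀.go s cur acc, t ≠ [] ∧ ∀ c ∈ t, PySem.Chars.isspace c = false := by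
  induction s generalizing cur acc with
  | nil =>
    intro t ht
    rw [PySem.Chars.split₀.go] at ht
    by_cases hc : cur = []
    · simp [hc] at ht
      exact hacc t ht
    · simp [List.isEmpty_iff, hc] at ht
      rcases ht with h | h
      · exact hacc t h
      · subst h
        refine ⟨by simpa using hc, ?_⟩
        intro c hcm
        exact hcur c (List.mem_reverse.mp hcm)
  | cons c rest ih =>
    intro t ht
    rw [PySem.Chars.split₀.go] at ht
    by_cases hs : PySem.Chars.isspace c = true
    · by_cases hc : cur = []
      · simp [hs, hc] at ht
        exact ih [] acc hacc (by simp) t ht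
      · simp [hs, List.isEmpty_iff, hc] at ht
        refine ih [] (cur.reverse :: acc) ?_ (by simp) t ht
        intro u hu
        rcases List.mem_cons.mp hu with hu | hu
        · subst hu
          exact ⟨by simpa using hc, fun d hd => hcur d (List.mem_reverse.mp hd)⟩
        · exact hacc u hu
    · simp [hs] at ht
      refine ih (c :: cur) acc hacc ?_ t ht
      intro d hd
      rcases List.mem_cons.mp hd with h | h
      · subst h; simpa using hs
      · exact hcur d h

theorem pv_split0_spec (s : List Char) :
    ∀ t ∈ PySem.Chars.split₀ s, t ≠ [] ∧ ∀ c ∈ t, PySem.Chars.isspace c = false := by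
  intro t ht
  unfold PySem.Chars.split₀ at ht
  exact pv_split0_go_spec s [] [] (by simp) (by simp) t ht

theorem pv_dropWhile_eq_self {p : Char → Bool} (l : List Char) (h : ∀ c ∈ l, p c = false) :
    List.dropWhile p l = l := by
  cases l with
  | nil => rfl
  | cons a t => rw [List.dropWhile_cons, h a (List.mem_cons_self)]; simp

theorem pv_chars_strip_wf (l : List Char) (h : ∀ c ∈ l, PySem.Chars.isspace c = false) :
    PySem.Chars.strip l = l := by
  unfold PySem.Chars.strip PySem.Chars.lstrip PySem.Chars.rstrip
  rw [pv_dropWhile_eq_self l h]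
  rw [pv_dropWhile_eq_self l.reverse (fun c hc => h c (List.mem_reverse.mp hc))]
  exact List.reverse_reverse l

def pvWF (p : String) : Prop := ∀ c ∈ p.toList, PySem.Chars.isspace c = false

theorem pv_strip_wf (p : String) (h : pvWF p) : PySem.Str.strip p = p := by
  unfold PySem.Str.strip
  rw [pv_chars_strip_wf p.toList h, String.ofList_toList]

theorem pv_stripor_wf (p : String) (h : pvWF p) : PySem.Str.strip (pv_or_empty p) = p := by
  by_cases hp : p = ""
  · subst hp; decide
  · rw [show pv_or_empty p = p by simp [pv_or_empty, hp]]
    exact pv_strip_wf p h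

theorem pv_str_split0_spec (s : String) :
    ∀ p ∈ PySem.Str.split₀ s, p ≠ "" ∧ pvWF p := by
  intro p hp
  unfold PySem.Str.split₀ at hp
  obtain ⟨t, ht, rfl⟩ := List.mem_map.mp hp
  obtain ⟨hne, hwf⟩ := pv_split0_spec s.toList t ht
  constructor
  · intro hcon
    exact hne (by simpa using congrArg String.toList hcon)
  · intro c hc
    exact hwf c (by simpa using hc)

theorem pv_go_m0 (sep : List Char) (fuel : Nat) (l cur : List Char) (acc : List (List Char)) :
    PySem.Chars.splitOnMax.go sep fuel 0 l cur acc = ((cur.reverse ++ l) :: acc).reverse := by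
  cases fuel with
  | zero => rw [PySem.Chars.splitOnMax.go]
  | succ f =>
    cases l with
    | nil => rw [PySem.Chars.splitOnMax.go] <;> simp
    | cons c rest => rw [PySem.Chars.splitOnMax.go] <;> simp

theorem pv_go1_no (l : List Char) (fuel : Nat) (cur : List Char) (acc : List (List Char))
    (hf : l.length < fuel) (h : ':' ∉ l) :
    PySem.Chars.splitOnMax.go [':'] fuel 1 l cur acc = acc.reverse ++ [cur.reverse ++ l] := by
  induction l generalizing fuel cur acc with
  | nil =>
    cases fuel with
    | zero => omega
    | succ f => rw [PySem.Chars.splitOnMax.go] <;> simp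
  | cons c rest ih =>
    cases fuel with
    | zero => omega
    | succ f =>
      rw [PySem.Chars.splitOnMax.go]
      have hc : ¬ c = ':' := fun hcc => h (by simp [hcc])
      have hpre : List.isPrefixOf [':'] (c :: rest) = false := by
        have hb : (':' == c) = false := by
          rw [beq_eq_false_iff_ne]; exact fun hcc => hc hcc.symm
        simp [List.isPrefixOf, hb]
      rw [if_neg (by norm_num : ¬ (1 : Nat) = 0), hpre, if_neg (by simp)]
      rw [ih f (c :: cur) acc (by simp at hf ⊢; omega)
          (fun hm => h (List.mem_cons_of_mem c hm))]
      simp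

theorem pv_go1_mem (l : List Char) (fuel : Nat) (cur : List Char) (acc : List (List Char))
    (hf : l.length < fuel) (h : ':' ∈ l) :
    ∃ u v, l = u ++ ':' :: v ∧ ':' ∉ u ∧
      PySem.Chars.splitOnMax.go [':'] fuel 1 l cur acc = acc.reverse ++ [cur.reverse ++ u, v] := by
  induction l generalizing fuel cur acc with
  | nil => simp at h
  | cons c rest ih =>
    cases fuel with
    | zero => simp at hf
    | succ f =>
      by_cases hc : c = ':'
      · refine ⟨[], rest, by simp [hc], by simp, ?_⟩
        rw [PySem.Chars.splitOnMax.go]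
        have hpre : List.isPrefixOf [':'] (c :: rest) = true := by subst hc; simp [List.isPrefixOf]
        rw [if_neg (by norm_num : ¬ (1 : Nat) = 0), hpre, if_pos rfl]
        rw [pv_go_m0]
        simp
      · have hm : ':' ∈ rest := by rcases List.mem_cons.mp h with h' | h'; exact absurd h'.symm hc; exact h'
        obtain ⟨u, v, hsplit, hnu, heq⟩ := ih f (c :: cur) acc (by simp at hf ⊢; omega) hm
        refine ⟨c :: u, v, by simp [hsplit], ?_, ?_⟩
        · intro hmem
          rcases List.mem_cons.mp hmem with h' | h'
          · exact hc h'.symm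
          · exact hnu h'
        · rw [PySem.Chars.splitOnMax.go]
          have hpre : List.isPrefixOf [':'] (c :: rest) = false := by
            have hb : (':' == c) = false := by
              rw [beq_eq_false_iff_ne]; exact fun hcc => hc hcc.symm
            simp [List.isPrefixOf, hb]
          rw [if_neg (by norm_num : ¬ (1 : Nat) = 0), hpre, if_neg (by simp)]
          rw [heq]
          simp

theorem pv_splitOnMax1_no (l : List Char) (h : ':' ∉ l) :
    PySem.Chars.splitOnMax l [':'] 1 = [l] := by
  unfold PySem.Chars.splitOnMax
  rw [if_neg (by norm_num), show Int.toNat 1 = 1 from rfl]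
  rw [pv_go1_no l (l.length + 1) [] [] (by omega) h]
  simp

theorem pv_splitOnMax1_mem (l : List Char) (h : ':' ∈ l) :
    ∃ u v, l = u ++ ':' :: v ∧ ':' ∉ u ∧ PySem.Chars.splitOnMax l [':'] 1 = [u, v] := by
  unfold PySem.Chars.splitOnMax
  rw [if_neg (by norm_num), show Int.toNat 1 = 1 from rfl]
  obtain ⟨u, v, hsplit, hnu, heq⟩ := pv_go1_mem l (l.length + 1) [] [] (by omega) h
  exact ⟨u, v, hsplit, hnu, by rw [heq]; simp⟩

theorem pv_isIn_colon (s : String) : PySem.Str.isIn ":" s = true ↔ ':' ∈ s.toList := by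
  rw [PySem.Str.isIn_iff_infix]
  constructor
  · intro hinf
    exact hinf.subset (by simp [(by decide : ":".toList = [':'])])
  · intro hm
    obtain ⟨u, v, huv⟩ := List.append_of_mem hm
    rw [show (":".toList) = [':'] from rfl, huv]
    exact ⟨u, v, by simp⟩

theorem pv_partition_of_split (u v : List Char) (hnu : ':' ∉ u) :
    pv_partition_colon (String.ofList (u ++ ':' :: v)) = (String.ofList u, String.ofList v) := by
  unfold pv_partition_colon
  have hl : (String.ofList (u ++ ':' :: v)).toList = u ++ ':' :: v := by simp
  rw [hl, if_pos (by simp)]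
  have htake : List.takeWhile (fun c => !(c == ':')) (u ++ ':' :: v) = u := by
    rw [List.takeWhile_append]
    have hall : ∀ c ∈ u, (!(c == ':')) = true := by
      intro c hc
      simp only [Bool.not_eq_eq_eq_not, Bool.not_true, beq_eq_false_iff_ne]
      exact fun hcc => hnu (hcc ▸ hc)
    rw [List.takeWhile_eq_self_iff.mpr hall]
    simp
  have hdrop : List.dropWhile (fun c => !(c == ':')) (u ++ ':' :: v) = ':' :: v := by
    rw [List.dropWhile_append]
    have hall : ∀ c ∈ u, (!(c == ':')) = true := by
      intro c hc
      simp only [Bool.not_eq_eq_eq_not, Bool.not_true, beq_eq_false_iff_ne]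
      exact fun hcc => hnu (hcc ▸ hc)
    rw [List.dropWhile_eq_nil_iff.mpr hall]
    simp
  rw [htake, hdrop]
  simp

theorem pv_partition_no (s : String) (h : ':' ∉ s.toList) :
    pv_partition_colon s = (s, "") := by
  unfold pv_partition_colon
  rw [if_neg h]

theorem pv_get0 (a : String) (l : List String) : (PySem.List.pyGet? (a::l) 0).getD "" = a := by
  simp [PySem.List.pyGet?, PySem.List.pyIdx?]

theorem pv_get1 (a b : String) (l : List String) : (PySem.List.pyGet? (a::b::l) 1).getD "" = b := by
  simp [PySem.List.pyGet?, PySem.List.pyIdx?]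

theorem pv_get2 (a b c : String) (l : List String) : (PySem.List.pyGet? (a::b::c::l) 2).getD "" = c := by
  simp [PySem.List.pyGet?, PySem.List.pyIdx?]
  rw [if_pos (by omega)]
  simp

theorem pv_slice12 (a b : String) (l : List String) :
    PySem.List.slice (a::b::l) (some 1) (some 2) = [b] := by
  simp [PySem.List.slice_toNat]

theorem pv_slice23 (a b c : String) (l : List String) :
    PySem.List.slice (a::b::c::l) (some 2) (some 3) = [c] := by
  simp [PySem.List.slice_toNat]

theorem pv_slice13 (a b c : String) (l : List String) :
    PySem.List.slice (a::b::c::l) (some 1) (some 3) = [b, c] := by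
  simp [PySem.List.slice_toNat]

theorem pv_join2 (a b : String) : PySem.Str.join " " [a, b] = a ++ " " ++ b := by
  have hl : (PySem.Str.join " " [a, b]).toList = (a ++ " " ++ b).toList := by
    rw [PySem.Str.toList_join]; simp [PySem.Chars.join, List.intercalate]
  calc PySem.Str.join " " [a, b] = String.ofList (PySem.Str.join " " [a, b]).toList := by rw [String.ofList_toList]
    _ = String.ofList (a ++ " " ++ b).toList := by rw [hl]
    _ = a ++ " " ++ b := by rw [String.ofList_toList]

theorem pv_join3 (a b c : String) : PySem.Str.join " " [a, b, c] = a ++ " " ++ b ++ " " ++ c := by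
  have hl : (PySem.Str.join " " [a, b, c]).toList = (a ++ " " ++ b ++ " " ++ c).toList := by
    rw [PySem.Str.toList_join]; simp [PySem.Chars.join, List.intercalate]
  calc PySem.Str.join " " [a, b, c] = String.ofList (PySem.Str.join " " [a, b, c]).toList := by rw [String.ofList_toList]
    _ = String.ofList (a ++ " " ++ b ++ " " ++ c).toList := by rw [hl]
    _ = a ++ " " ++ b ++ " " ++ c := by rw [String.ofList_toList]

theorem pv_eq_of_toList {a b : String} (h : a.toList = b.toList) : a = b := by
  calc a = String.ofList a.toList := by rw [String.ofList_toList]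
    _ = String.ofList b.toList := by rw [h]
    _ = b := by rw [String.ofList_toList]

theorem pv_dispatch_eq (cmd : String) (parts : List String)
    (slots : List (Int × (List String → String)))
    (h : pv_grammar.get? cmd = some slots) :
    pv_dispatch cmd parts =
      (if (((List.map (fun s => s.1) slots).sum == 0) = true) then
        (if ((parts.length == 1) = true) then cmd else "")
       else if ((parts.length : Int) < 1 + (List.map (fun s => s.1) slots).sum) then ""
       else pv_run_slots parts slots 1 [cmd]) := by
  delta pv_dispatch
  rw [h]

set_option maxHeartbeats 1000000 in
theorem pv_main (command : String) :
    canonicalize_plan_command_py command = canonicalize_plan_command_py_alt command := by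
  simp only [canonicalize_plan_command_py, canonicalize_plan_command_py_alt]
  have htoks := pv_str_split0_spec (PySem.Str.strip (pv_or_empty command))
  cases hsw : PySem.Str.startswith (PySem.Str.strip (pv_or_empty command)) "/" with
  | false => simp only [Bool.not_false, reduceIte]
  | true =>
    have hfilt : List.filter (fun part => !(part == "")) (PySem.Str.split₀ (PySem.Str.strip (pv_or_empty command))) = PySem.Str.split₀ (PySem.Str.strip (pv_or_empty command)) := by
      apply List.filter_eq_self.mpr
      intro p hp
      simpa using (htoks p hp).1
    rw [hfilt]
    simp only [Bool.not_true, Bool.false_eq_true, if_false, reduceIte]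
    revert htoks
    generalize PySem.Str.split₀ (PySem.Str.strip (pv_or_empty command)) = L
    intro htoks
    cases L with
    | nil => rfl
    | cons p0 rest =>
      obtain ⟨hp0ne, hp0wf⟩ := htoks p0 List.mem_cons_self
      rw [pv_get0, pv_strip_wf p0 hp0wf]
      rw [show ((p0 :: rest : List String) == []) = false from rfl]
      simp only [Bool.false_eq_true, if_false]
      by_cases hc1 : PySem.Str.lower p0 = "/fix"
      · rw [hc1]
        rw [pv_dispatch_eq _ _ _ (show pv_grammar.get? "/fix" = some [] by simp [pv_grammar, PySem.Dict.get?_mk_cons])]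
        simp
      by_cases hc2 : PySem.Str.lower p0 = "/inspect"
      · rw [hc2]
        rw [pv_dispatch_eq _ _ _ (show pv_grammar.get? "/inspect" = some [] by simp [pv_grammar, PySem.Dict.get?_mk_cons])]
        simp
      by_cases hc3 : PySem.Str.lower p0 = "/next"
      · rw [hc3]
        rw [pv_dispatch_eq _ _ _ (show pv_grammar.get? "/next" = some [] by simp [pv_grammar, PySem.Dict.get?_mk_cons])]
        simp
      by_cases hc4 : PySem.Str.lower p0 = "/auto"
      · rw [hc4]
        rw [pv_dispatch_eq _ _ _ (show pv_grammar.get? "/auto" = some [] by simp [pv_grammar, PySem.Dict.get?_mk_cons])]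
        simp
      by_cases hc5 : PySem.Str.lower p0 = "/add_entity"
      · rw [hc5]
        rw [pv_dispatch_eq _ _ _ (show pv_grammar.get? "/add_entity" = some [(1, pv_slot_ident)] by simp [pv_grammar, PySem.Dict.get?_mk_cons])]
        cases rest with
        | nil => simp [pv_run_slots]
        | cons p1 r2 =>
          obtain ⟨hp1ne, hp1wf⟩ := htoks p1 (by simp)
          have hlt : ¬ (((p0 :: p1 :: r2).length : Int) < 1 + (1 + 0)) := by
            simp only [List.length_cons]; push_cast; omega
          rw [pv_get1, pv_stripor_wf p1 hp1wf]
          conv_rhs =>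
            rw [List.map_cons, List.map_nil, List.sum_cons, List.sum_nil,
              if_neg (show ¬ (((1 : Int) + 0 == 0) = true) by norm_num), if_neg hlt]
          simp only [pv_run_slots]
          conv_rhs => rw [show ((1 : Int) + 1) = 2 by norm_num, pv_slice12]
          simp only [pv_slot_ident, pv_get0, List.cons_append, List.nil_append]
          have hcat : ("/add_entity " ++ p1 : String) = "/add_entity" ++ " " ++ p1 :=
            pv_eq_of_toList (by simp)
          simp [pv_run_slots, pv_join2, beq_eq_false_iff_ne.mpr hp1ne, hcat]
      by_cases hc6 : PySem.Str.lower p0 = "/add_field"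
      · rw [hc6]
        rw [pv_dispatch_eq _ _ _ (show pv_grammar.get? "/add_field" = some [(1, pv_slot_ident), (1, pv_slot_field)] by simp [pv_grammar, PySem.Dict.get?_mk_cons])]
        cases rest with
        | nil => simp [pv_run_slots]
        | cons p1 r2 =>
          cases r2 with
          | nil =>
            conv_rhs =>
              rw [List.map_cons, List.map_cons, List.map_nil, List.sum_cons, List.sum_cons, List.sum_nil,
                if_neg (show ¬ (((1 : Int) + (1 + 0) == 0) = true) by norm_num),
                if_pos (show (((p0 :: p1 :: ([] : List String)).length : Int) < 1 + (1 + (1 + 0))) by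
                  simp only [List.length_cons, List.length_nil]; norm_num)]
            simp
          | cons p2 r3 =>
            have hlt : ¬ (((p0 :: p1 :: p2 :: r3).length : Int) < 1 + (1 + (1 + 0))) := by
              simp only [List.length_cons]; push_cast; omega
            obtain ⟨hp1ne, hp1wf⟩ := htoks p1 (by simp)
            obtain ⟨hp2ne, hp2wf⟩ := htoks p2 (by simp)
            rw [pv_get1, pv_get2, pv_stripor_wf p1 hp1wf, pv_stripor_wf p2 hp2wf]
            rw [show PySem.Str.splitMax? p2 ":" 1 = some (List.map String.ofList (PySem.Chars.splitOnMax p2.toList [':'] 1)) from rfl]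
            conv_rhs =>
              rw [List.map_cons, List.map_cons, List.map_nil, List.sum_cons, List.sum_cons, List.sum_nil,
                if_neg (show ¬ (((1 : Int) + (1 + 0) == 0) = true) by norm_num), if_neg hlt]
            simp only [pv_run_slots]
            conv_rhs => rw [show ((1 : Int) + 1) = 2 by norm_num, pv_slice12]
            simp only [pv_slot_ident, pv_get0, List.cons_append, List.nil_append]
            rw [if_neg (show ¬ ((p1 == "") = true) by simpa using hp1ne)]
            conv_rhs => rw [show ((2 : Int) + 1) = 3 by norm_num, pv_slice23]
            simp only [pv_slot_field, pv_get0]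
            by_cases hmem : ':' ∈ p2.toList
            · obtain ⟨u, v, huv, hnu, heq⟩ := pv_splitOnMax1_mem p2.toList hmem
              rw [heq, (pv_isIn_colon p2).mpr hmem]
              rw [show pv_partition_colon p2 = (String.ofList u, String.ofList v) by
                    rw [show p2 = String.ofList (u ++ ':' :: v) by rw [← huv, String.ofList_toList]]
                    exact pv_partition_of_split u v hnu]
              have huwf : pvWF (String.ofList u) := by
                intro c hc
                exact hp2wf c (by rw [huv]; simp at hc ⊢; exact Or.inl hc)
              have hvwf : pvWF (String.ofList v) := by
                intro c hc
                exact hp2wf c (by rw [huv]; simp at hc ⊢; exact Or.inr (Or.inr hc))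
              simp only [Option.getD_some, List.map_cons, List.map_nil, reduceIte]
              rw [pv_get0, pv_get1, pv_stripor_wf _ huwf, pv_stripor_wf _ hvwf]
              by_cases hn : PySem.Str.lower (String.ofList u) = ""
              · rw [hn]
                simp [pv_run_slots]
              · have htokne : ∀ T : String,
                    ((PySem.Str.lower (String.ofList u) ++ ":" ++ T) == "") = false := by
                  intro T
                  apply beq_eq_false_iff_ne.mpr
                  intro hcon
                  have := congrArg String.toList hcon
                  simp at this
                have hcat : ∀ T : String,
                    ("/add_field " ++ p1 ++ " " ++ PySem.Str.lower (String.ofList u) ++ ":" ++ T : String)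
                      = "/add_field" ++ " " ++ p1 ++ " " ++ (PySem.Str.lower (String.ofList u) ++ ":" ++ T) := by
                  intro T
                  exact pv_eq_of_toList (by simp)
                simp [pv_run_slots, pv_join3, beq_eq_false_iff_ne.mpr hp1ne,
                  beq_eq_false_iff_ne.mpr hn, htokne, hcat]
            · rw [pv_splitOnMax1_no p2.toList hmem,
                show PySem.Str.isIn ":" p2 = false from
                  Bool.eq_false_iff.mpr (fun h => hmem ((pv_isIn_colon p2).mp h)),
                pv_partition_no p2 hmem]
              simp only [Option.getD_some, List.map_cons, List.map_nil, String.ofList_toList,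
                Bool.false_eq_true, if_false]
              rw [show PySem.Str.lower (PySem.Str.strip (pv_or_empty "string")) = "string" from rfl]
              rw [show PySem.Str.lower "" = "" from rfl]
              rw [pv_stripor_wf p2 hp2wf]
              by_cases hn : PySem.Str.lower p2 = ""
              · rw [hn]
                simp [pv_run_slots]
              · have htokne : ((PySem.Str.lower p2 ++ ":" ++ "string" : String) == "") = false := by
                  apply beq_eq_false_iff_ne.mpr
                  intro hcon
                  have := congrArg String.toList hcon
                  simp at this
                have hcat : ("/add_field " ++ p1 ++ " " ++ PySem.Str.lower p2 ++ ":" ++ "string" : String)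
                      = "/add_field" ++ " " ++ p1 ++ " " ++ (PySem.Str.lower p2 ++ ":" ++ "string") :=
                  pv_eq_of_toList (by simp)
                simp [pv_run_slots, pv_join3, beq_eq_false_iff_ne.mpr hp1ne,
                  beq_eq_false_iff_ne.mpr hn, htokne, hcat]
      by_cases hc7 : PySem.Str.lower p0 = "/add_api"
      · rw [hc7]
        rw [pv_dispatch_eq _ _ _ (show pv_grammar.get? "/add_api" = some [(2, pv_slot_api)] by simp [pv_grammar, PySem.Dict.get?_mk_cons])]
        cases rest with
        | nil => simp [pv_run_slots]
        | cons p1 r2 =>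
          cases r2 with
          | nil =>
            conv_rhs =>
              rw [List.map_cons, List.map_nil, List.sum_cons, List.sum_nil,
                if_neg (show ¬ (((2 : Int) + 0 == 0) = true) by norm_num),
                if_pos (show (((p0 :: p1 :: ([] : List String)).length : Int) < 1 + (2 + 0)) by
                  simp only [List.length_cons, List.length_nil]; norm_num)]
            simp
          | cons p2 r3 =>
            have hlt : ¬ (((p0 :: p1 :: p2 :: r3).length : Int) < 1 + (2 + 0)) := by
              simp only [List.length_cons]; push_cast; omega
            rw [pv_get1, pv_get2]
            conv_rhs =>
              rw [List.map_cons, List.map_nil, List.sum_cons, List.sum_nil,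
                if_neg (show ¬ (((2 : Int) + 0 == 0) = true) by norm_num), if_neg hlt]
            simp only [pv_run_slots]
            conv_rhs => rw [show ((1 : Int) + 2) = 3 by norm_num, pv_slice13]
            simp only [pv_slot_api, pv_get0, pv_get1, List.cons_append, List.nil_append]
            by_cases he : pv_norm_api p1 p2 = ""
            · rw [he]
              simp
            · have hcat : ("/add_api " ++ pv_norm_api p1 p2 : String)
                  = "/add_api" ++ " " ++ pv_norm_api p1 p2 := pv_eq_of_toList (by simp)
              simp [pv_run_slots, pv_join2, beq_eq_false_iff_ne.mpr he, hcat]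
      by_cases hc8 : PySem.Str.lower p0 = "/add_page"
      · rw [hc8]
        rw [pv_dispatch_eq _ _ _ (show pv_grammar.get? "/add_page" = some [(1, pv_slot_page)] by simp [pv_grammar, PySem.Dict.get?_mk_cons])]
        cases rest with
        | nil => simp [pv_run_slots]
        | cons p1 r2 =>
          have hlt : ¬ (((p0 :: p1 :: r2).length : Int) < 1 + (1 + 0)) := by
            simp only [List.length_cons]; push_cast; omega
          rw [pv_get1]
          conv_rhs =>
            rw [List.map_cons, List.map_nil, List.sum_cons, List.sum_nil,
              if_neg (show ¬ (((1 : Int) + 0 == 0) = true) by norm_num), if_neg hlt]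
          simp only [pv_run_slots]
          conv_rhs => rw [show ((1 : Int) + 1) = 2 by norm_num, pv_slice12]
          simp only [pv_slot_page, pv_get0, List.cons_append, List.nil_append]
          by_cases he : pv_norm_page p1 = ""
          · rw [he]
            simp
          · have hcat : ("/add_page " ++ pv_norm_page p1 : String)
                = "/add_page" ++ " " ++ pv_norm_page p1 := pv_eq_of_toList (by simp)
            simp [pv_run_slots, pv_join2, beq_eq_false_iff_ne.mpr he, hcat]
      by_cases hc9 : PySem.Str.lower p0 = "/implement_page"
      · rw [hc9]
        rw [pv_dispatch_eq _ _ _ (show pv_grammar.get? "/implement_page" = some [(1, pv_slot_page)] by simp [pv_grammar, PySem.Dict.get?_mk_cons])]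
        cases rest with
        | nil => simp [pv_run_slots]
        | cons p1 r2 =>
          have hlt : ¬ (((p0 :: p1 :: r2).length : Int) < 1 + (1 + 0)) := by
            simp only [List.length_cons]; push_cast; omega
          rw [pv_get1]
          conv_rhs =>
            rw [List.map_cons, List.map_nil, List.sum_cons, List.sum_nil,
              if_neg (show ¬ (((1 : Int) + 0 == 0) = true) by norm_num), if_neg hlt]
          simp only [pv_run_slots]
          conv_rhs => rw [show ((1 : Int) + 1) = 2 by norm_num, pv_slice12]
          simp only [pv_slot_page, pv_get0, List.cons_append, List.nil_append]
          by_cases he : pv_norm_page p1 = ""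
          · rw [he]
            simp
          · have hcat : ("/implement_page " ++ pv_norm_page p1 : String)
                = "/implement_page" ++ " " ++ pv_norm_page p1 := pv_eq_of_toList (by simp)
            simp [pv_run_slots, pv_join2, beq_eq_false_iff_ne.mpr he, hcat]
      have hnone : pv_grammar.get? (PySem.Str.lower p0) = none := by
        simp only [pv_grammar, PySem.Dict.get?_mk_cons, beq_iff_eq]
        rw [if_neg (fun h => hc1 h.symm), if_neg (fun h => hc2 h.symm),
          if_neg (fun h => hc3 h.symm), if_neg (fun h => hc4 h.symm),
          if_neg (fun h => hc5 h.symm), if_neg (fun h => hc6 h.symm),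
          if_neg (fun h => hc7 h.symm), if_neg (fun h => hc8 h.symm),
          if_neg (fun h => hc9 h.symm)]
        rfl
      rw [show pv_dispatch (PySem.Str.lower p0) (p0 :: rest) = "" by delta pv_dispatch; rw [hnone]]
      simp [beq_eq_false_iff_ne.mpr hc1, beq_eq_false_iff_ne.mpr hc2,
        beq_eq_false_iff_ne.mpr hc3, beq_eq_false_iff_ne.mpr hc4,
        beq_eq_false_iff_ne.mpr hc5, beq_eq_false_iff_ne.mpr hc6,
        beq_eq_false_iff_ne.mpr hc7, beq_eq_false_iff_ne.mpr hc8,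
        beq_eq_false_iff_ne.mpr hc9]

-- ===== VERDICT (by name: the statement is the Claim_ definition above) =====
theorem canonicalize_plan_command_py_spec : Claim_equal_canonicalize_plan_command_py := by
  intro command _
  show canonicalize_plan_command_py command = canonicalize_plan_command_py_alt command
  exact pv_main command
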